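-- pv_equiv track=rewrite | github.com/goksuko/python_studies | CodeSignal/Q4_LookupTable.py | lookupTable
-- ===== SOURCE A (Python) =====
-- from typing import List
-- from collections import defaultdict
--
-- def lookupTable(nums: List[int]) -> int:
--     mp = defaultdict(list)
--     for i in range(len(nums)):
--         mp[nums[i]].append(i)
--     powers = [1,2,4,8,16,32,64,128,256]
--     ans = 0
--     for key, k_i in mp.items():
--         for other, o_i in mp.items():
--             if key + other in powers and k_i <= o_i:
--                 ans += 1
--     return ans
-- ===== SOURCE B (Python) =====
-- def lookupTable(nums):
--     s = set(nums)
--     powers = (1, 2, 4, 8, 16, 32, 64, 128, 256)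
--     ans = 0
--     for v in s:
--         for p in powers:
--             w = p - v
--             if w in s and v <= w:
--                 ans += 1
--     return ans
-- ===== Notes on version B (the rewrite author's own statement) =====
-- stated objective: faster
-- what changed: Replaces the O(K^2) double loop over dict items (which compares index lists lexicographically to pick one orientation of each pair) with a single pass over the distinct values trying each of the 9 powers and checking the complement in the set, picking the orientation by value order.
import Mathlib
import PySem

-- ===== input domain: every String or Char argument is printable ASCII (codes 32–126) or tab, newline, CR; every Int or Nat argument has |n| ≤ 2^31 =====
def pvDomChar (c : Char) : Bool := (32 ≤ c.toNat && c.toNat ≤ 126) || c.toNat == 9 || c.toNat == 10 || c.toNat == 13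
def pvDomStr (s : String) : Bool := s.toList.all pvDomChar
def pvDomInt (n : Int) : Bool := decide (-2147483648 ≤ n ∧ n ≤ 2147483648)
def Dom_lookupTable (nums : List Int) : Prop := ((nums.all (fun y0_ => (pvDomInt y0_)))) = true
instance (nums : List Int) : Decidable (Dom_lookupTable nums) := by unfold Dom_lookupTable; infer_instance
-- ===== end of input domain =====

-- B replaces A's O(K^2) double loop over the dict's (value, index-list) items by a single
-- pass over the distinct values that tries each of the 9 powers and looks the complement up
-- in the set (objective: faster; a timing run measured the asymptotic speed-up).

-- ===== PORT A =====
-- Python's `k_i <= o_i` on two lists of ints (lexicographic; a prefix is ≤ its extension).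
def pyListLe : List Int → List Int → Bool
  | [], _ => true
  | _ :: _, [] => false
  | a :: as, b :: bs => if a < b then true else if b < a then false else pyListLe as bs

def lookupTable (nums : List Int) : Int :=
  -- mp = defaultdict(list); for i in range(len(nums)): mp[nums[i]].append(i)
  let mp : PySem.Dict Int (List Int) :=
    (PySem.List.enumerate nums).foldl (fun d p => d.modify p.2 [] (· ++ [p.1])) PySem.Dict.empty
  let powers : List Int := [1, 2, 4, 8, 16, 32, 64, 128, 256]
  mp.items.foldl (fun ans kp =>
    mp.items.foldl (fun ans op =>
      if kp.1 + op.1 ∈ powers ∧ pyListLe kp.2 op.2 then ans + 1 else ans) ans) 0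

-- ===== PORT B =====
def lookupTable_alt (nums : List Int) : Int :=
  let s : PySem.Set Int := PySem.Set.ofList nums
  let powers : List Int := [1, 2, 4, 8, 16, 32, 64, 128, 256]
  -- iterating the set only feeds a sum, which is independent of the iteration order
  s.foldl (fun ans v =>
    powers.foldl (fun ans p =>
      if PySem.Set.contains s (p - v) ∧ v ≤ p - v then ans + 1 else ans) ans) 0

-- ===== PRECONDITION & SPEC =====
def Spec_lookupTable (nums : List Int) (out : Int) : Prop := out = lookupTable_alt nums
instance (nums : List Int) (out : Int) : Decidable (Spec_lookupTable nums out) := by unfold Spec_lookupTable; infer_instance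

-- ===== CLAIM (what is proved, stated in full; the proofs are below) =====
def Claim_equal_lookupTable : Prop := ∀ (nums : List Int), Dom_lookupTable nums → Spec_lookupTable nums (lookupTable nums)

-- ===== LEMMAS AND PROOFS =====

-- the list of indices at which x occurs in nums, as A's dict stores it
def pvIdx (nums : List Int) (x : Int) : List Int :=
  ((PySem.List.enumerate nums).filter (fun p => p.2 == x)).map (·.1)

def pvPowers : List Int := [1, 2, 4, 8, 16, 32, 64, 128, 256]

theorem pyListLe_refl (l : List Int) : pyListLe l l = true := by
  induction l with
  | nil => rfl
  | cons a as ih => simp [pyListLe, ih]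

theorem pyListLe_total (l m : List Int) : pyListLe l m = true ∨ pyListLe m l = true := by
  induction l generalizing m with
  | nil => left; rfl
  | cons a as ih =>
    cases m with
    | nil => right; rfl
    | cons b bs =>
      rcases lt_trichotomy a b with h | h | h
      · left; simp [pyListLe, h]
      · subst h
        rcases ih bs with h' | h' <;> [left; right] <;> simp [pyListLe, h']
      · right; simp [pyListLe, h]

theorem pyListLe_antisymm (l m : List Int) (h1 : pyListLe l m = true) (h2 : pyListLe m l = true) :
    l = m := by
  induction l generalizing m with
  | nil => cases m with
    | nil => rfl
    | cons b bs => simp [pyListLe] at h2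
  | cons a as ih =>
    cases m with
    | nil => simp [pyListLe] at h1
    | cons b bs =>
      rcases lt_trichotomy a b with h | h | h
      · simp [pyListLe, h, not_lt.mpr h.le] at h2
      · subst h
        simp [pyListLe] at h1 h2
        rw [ih bs h1 h2]
      · simp [pyListLe, h, not_lt.mpr h.le] at h1

-- membership in pvIdx names the position and pins the element
theorem mem_pvIdx (nums : List Int) (x : Int) (i : Int) (h : i ∈ pvIdx nums x) :
    ∃ (k : Nat) (hk : k < nums.length), i = (k : Int) ∧ nums[k] = x := by
  unfold pvIdx at h
  rcases List.mem_map.mp h with ⟨p, hp, hpi⟩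
  rcases List.mem_filter.mp hp with ⟨hpe, hpx⟩
  rcases (PySem.List.mem_enumerate_iff nums 0 p).mp hpe with ⟨k, hk, rfl⟩
  exact ⟨k, hk, by simpa using hpi.symm, by simpa using hpx⟩

theorem pvIdx_ne (nums : List Int) (x y : Int) (hx : x ∈ nums) (hxy : x ≠ y) :
    pvIdx nums x ≠ pvIdx nums y := by
  intro heq
  rcases List.mem_iff_getElem.mp hx with ⟨k, hk, rfl⟩
  have hmem : ((k : Int)) ∈ pvIdx nums nums[k] := by
    unfold pvIdx
    refine List.mem_map.mpr ⟨((k : Int), nums[k]), List.mem_filter.mpr ⟨?_, by simp⟩, rfl⟩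
    exact (PySem.List.mem_enumerate_iff nums 0 _).mpr ⟨k, hk, by simp⟩
  rw [heq] at hmem
  rcases mem_pvIdx nums y _ hmem with ⟨k', hk', hkk', hy⟩
  have : k = k' := by exact_mod_cast hkk'
  subst this
  exact hxy (hy ▸ rfl)

-- A's dict: items are the distinct values in first-occurrence order, each with its index list
theorem mp_items (nums : List Int) :
    ((PySem.List.enumerate nums).foldl (fun d p => d.modify p.2 [] (· ++ [p.1]))
      (PySem.Dict.empty : PySem.Dict Int (List Int))).items
      = (PySem.Set.ofList nums).map (fun k => (k, pvIdx nums k)) := by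
  have hkeys : ((PySem.List.enumerate nums).foldl (fun d p => d.modify p.2 [] (· ++ [p.1]))
      (PySem.Dict.empty : PySem.Dict Int (List Int))).keys = PySem.Set.ofList nums := by
    rw [PySem.Dict.keys_foldl_modify_key (PySem.List.enumerate nums) (fun p => p.2) []
      (fun _ p v => v ++ [p.1]) PySem.Dict.empty]
    simp [PySem.List.map_snd_enumerate, PySem.Set.update_nil_left]
  have hnd : ((PySem.List.enumerate nums).foldl (fun d p => d.modify p.2 [] (· ++ [p.1]))
      (PySem.Dict.empty : PySem.Dict Int (List Int))).keys.Nodup := by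
    rw [hkeys]; exact PySem.Set.nodup_ofList nums
  rw [PySem.Dict.items_eq_map_keys _ hnd [], hkeys]
  refine List.map_congr_left (fun k _ => ?_)
  have hswap : (PySem.List.enumerate nums).foldl (fun d p => d.modify p.2 [] (· ++ [p.1]))
      (PySem.Dict.empty : PySem.Dict Int (List Int))
      = ((PySem.List.enumerate nums).map Prod.swap).foldl
          (fun d p => d.modify p.1 [] (· ++ [p.2])) PySem.Dict.empty := by
    rw [List.foldl_map]
    rfl
  rw [hswap, PySem.Dict.getD_foldl_modify_append]
  unfold pvIdx
  simp [List.filter_map, List.map_map, Function.comp_def, Prod.swap]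

-- double 0/1-sums over a nodup list agree when the two summands agree pairwise after symmetrisation
theorem double_sum_swap_eq (d : List Int) (hnd : d.Nodup) (f g : Int → Int → Int)
    (h : ∀ x ∈ d, ∀ y ∈ d, f x y + f y x = g x y + g y x) :
    (d.map (fun x => (d.map (f x)).sum)).sum = (d.map (fun x => (d.map (g x)).sum)).sum := by
  have key : ∀ F : Int → Int → Int,
      (d.map (fun x => (d.map (F x)).sum)).sum = ∑ x ∈ d.toFinset, ∑ y ∈ d.toFinset, F x y := by
    intro F
    rw [← List.sum_toFinset _ hnd]
    exact Finset.sum_congr rfl (fun x _ => (List.sum_toFinset _ hnd).symm)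
  rw [key f, key g]
  have swapF : ∀ F : Int → Int → Int,
      (∑ x ∈ d.toFinset, ∑ y ∈ d.toFinset, F x y) = ∑ x ∈ d.toFinset, ∑ y ∈ d.toFinset, F y x := by
    intro F; exact Finset.sum_comm
  have hs : ∀ F : Int → Int → Int,
      (∑ x ∈ d.toFinset, ∑ y ∈ d.toFinset, F x y) + (∑ x ∈ d.toFinset, ∑ y ∈ d.toFinset, F x y)
        = ∑ x ∈ d.toFinset, ∑ y ∈ d.toFinset, (F x y + F y x) := by
    intro F
    nth_rewrite 2 [swapF F]
    rw [← Finset.sum_add_distrib]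
    exact Finset.sum_congr rfl (fun x _ => by rw [← Finset.sum_add_distrib])
  have h2 : (∑ x ∈ d.toFinset, ∑ y ∈ d.toFinset, f x y) + (∑ x ∈ d.toFinset, ∑ y ∈ d.toFinset, f x y)
      = (∑ x ∈ d.toFinset, ∑ y ∈ d.toFinset, g x y) + (∑ x ∈ d.toFinset, ∑ y ∈ d.toFinset, g x y) := by
    rw [hs f, hs g]
    refine Finset.sum_congr rfl (fun x hx => Finset.sum_congr rfl (fun y hy => ?_))
    exact h x (List.mem_toFinset.mp hx) y (List.mem_toFinset.mp hy)
  omega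

-- inner step of B: trying the 9 powers and looking the complement up in the set counts
-- exactly the partners y in the set with x + y a power
theorem inner_powers_eq (d : List Int) (hnd : d.Nodup) (x : Int) :
    (pvPowers.map (fun p => if ((p - x) ∈ d ∧ x ≤ p - x : Prop) then (1 : Int) else 0)).sum
      = (d.map (fun y => if ((x + y) ∈ pvPowers ∧ x ≤ y : Prop) then (1 : Int) else 0)).sum := by
  have hpd : pvPowers.Nodup := by decide
  have e1 : (pvPowers.map (fun p => if ((p - x) ∈ d ∧ x ≤ p - x : Prop) then (1 : Int) else 0)).sum
      = ((pvPowers.filter (fun p => decide ((p - x) ∈ d ∧ x ≤ p - x))).length : Int) := by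
    rw [← List.countP_eq_length_filter]
    have := PySem.List.sum_map_ite_one_zero (fun p => decide ((p - x) ∈ d ∧ x ≤ p - x)) pvPowers
    simpa using this
  have e2 : (d.map (fun y => if ((x + y) ∈ pvPowers ∧ x ≤ y : Prop) then (1 : Int) else 0)).sum
      = ((d.filter (fun y => decide ((x + y) ∈ pvPowers ∧ x ≤ y))).length : Int) := by
    rw [← List.countP_eq_length_filter]
    have := PySem.List.sum_map_ite_one_zero (fun y => decide ((x + y) ∈ pvPowers ∧ x ≤ y)) d
    simpa using this
  rw [e1, e2]
  congr 1
  rw [← List.toFinset_card_of_nodup (List.Nodup.filter _ hpd),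
      ← List.toFinset_card_of_nodup (List.Nodup.filter _ hnd)]
  refine Finset.card_bij (fun p _ => p - x) ?_ ?_ ?_
  · intro p hp
    simp only [List.toFinset_filter, Finset.mem_filter, List.mem_toFinset,
      decide_eq_true_eq] at hp ⊢
    refine ⟨hp.2.1, ?_, hp.2.2⟩
    rw [show x + (p - x) = p by ring]
    exact hp.1
  · intro p hp q hq hpq
    simp only at hpq
    omega
  · intro y hy
    simp only [List.toFinset_filter, Finset.mem_filter, List.mem_toFinset,
      decide_eq_true_eq] at hy
    refine ⟨x + y, ?_, by ring⟩
    simp only [List.toFinset_filter, Finset.mem_filter, List.mem_toFinset, decide_eq_true_eq]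
    exact ⟨hy.2.1, by rw [show x + y - x = y by ring]; exact hy.1,
      by rw [show x + y - x = y by ring]; exact hy.2.2⟩

-- nested count-loop = double 0/1-sum
theorem nested_foldl_sum {α : Type} (l m : List α) (F : α → α → Prop)
    [inst : ∀ a b, Decidable (F a b)] (init : Int) :
    l.foldl (fun ans kp => m.foldl (fun ans op => if F kp op then ans + 1 else ans) ans) init
      = init + (l.map (fun kp => (m.map (fun op => if F kp op then (1 : Int) else 0)).sum)).sum := by
  have inner : ∀ kp,
      (fun (ans : Int) op => if F kp op then ans + 1 else ans)
        = (fun ans op => ans + if F kp op then (1 : Int) else 0) := by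
    intro kp; funext a b; split <;> ring
  have houter : (fun (ans : Int) kp => m.foldl (fun ans op => if F kp op then ans + 1 else ans) ans)
      = (fun ans kp => ans + (m.map (fun op => if F kp op then (1 : Int) else 0)).sum) := by
    funext a kp
    rw [inner kp]
    exact PySem.List.foldl_add m _ a
  rw [houter]
  exact PySem.List.foldl_add l _ init

-- the symmetrised pairwise agreement of A's and B's pair predicates
theorem pointwise_agree (nums : List Int) (x y : Int)
    (hx : x ∈ PySem.Set.ofList nums) (hy : y ∈ PySem.Set.ofList nums) :
    ((if x + y ∈ pvPowers ∧ pyListLe (pvIdx nums x) (pvIdx nums y) then (1 : Int) else 0)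
      + (if y + x ∈ pvPowers ∧ pyListLe (pvIdx nums y) (pvIdx nums x) then (1 : Int) else 0))
    = ((if x + y ∈ pvPowers ∧ x ≤ y then (1 : Int) else 0)
      + (if y + x ∈ pvPowers ∧ y ≤ x then (1 : Int) else 0)) := by
  by_cases hxy : x = y
  · subst hxy
    simp [pyListLe_refl]
  · by_cases hC : x + y ∈ pvPowers
    · have hC' : y + x ∈ pvPowers := by rwa [add_comm]
      have hne : pvIdx nums x ≠ pvIdx nums y :=
        pvIdx_ne nums x y ((PySem.Set.mem_ofList nums x).mp hx) hxy
      have hone : (pyListLe (pvIdx nums x) (pvIdx nums y) = true ∧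
            ¬ pyListLe (pvIdx nums y) (pvIdx nums x) = true)
          ∨ (¬ pyListLe (pvIdx nums x) (pvIdx nums y) = true ∧
            pyListLe (pvIdx nums y) (pvIdx nums x) = true) := by
        rcases pyListLe_total (pvIdx nums x) (pvIdx nums y) with h | h
        · exact Or.inl ⟨h, fun h' => hne (pyListLe_antisymm _ _ h h')⟩
        · exact Or.inr ⟨fun h' => hne (pyListLe_antisymm _ _ h' h), h⟩
      rcases hone with ⟨h1, h2⟩ | ⟨h1, h2⟩ <;>
        rcases (show x ≤ y ∧ ¬ y ≤ x ∨ ¬ x ≤ y ∧ y ≤ x by omega) with ⟨h3, h4⟩ | ⟨h3, h4⟩ <;>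
        simp [hC, hC', h1, h2, h3, h4]
    · have hC' : y + x ∉ pvPowers := by rwa [add_comm]
      simp [hC, hC']

-- ===== VERDICT (by name: the statement is the Claim_ definition above) =====
theorem lookupTable_spec : Claim_equal_lookupTable := by
  intro nums _
  unfold Spec_lookupTable
  show lookupTable nums = lookupTable_alt nums
  have hnd : (PySem.Set.ofList nums).Nodup := PySem.Set.nodup_ofList nums
  have hA : lookupTable nums
      = ((PySem.Set.ofList nums).map (fun x => ((PySem.Set.ofList nums).map (fun y =>
          if x + y ∈ pvPowers ∧ pyListLe (pvIdx nums x) (pvIdx nums y) then (1 : Int) else 0)).sum)).sum := by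
    show ((PySem.List.enumerate nums).foldl (fun d p => d.modify p.2 [] (· ++ [p.1]))
        (PySem.Dict.empty : PySem.Dict Int (List Int))).items.foldl (fun ans kp =>
        ((PySem.List.enumerate nums).foldl (fun d p => d.modify p.2 [] (· ++ [p.1]))
          (PySem.Dict.empty : PySem.Dict Int (List Int))).items.foldl (fun ans op =>
          if kp.1 + op.1 ∈ pvPowers ∧ pyListLe kp.2 op.2 then ans + 1 else ans) ans) 0 = _
    rw [mp_items nums,
      nested_foldl_sum _ _ (fun kp op : Int × List Int => kp.1 + op.1 ∈ pvPowers ∧ pyListLe kp.2 op.2 = true) 0]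
    simp [List.map_map, Function.comp_def]
  have hB : lookupTable_alt nums
      = ((PySem.Set.ofList nums).map (fun v => (pvPowers.map (fun p =>
          if (p - v) ∈ (PySem.Set.ofList nums : List Int) ∧ v ≤ p - v then (1 : Int) else 0)).sum)).sum := by
    show (PySem.Set.ofList nums).foldl (fun ans v => pvPowers.foldl (fun ans p =>
        if PySem.Set.contains (PySem.Set.ofList nums) (p - v) ∧ v ≤ p - v then ans + 1 else ans) ans) 0 = _
    rw [nested_foldl_sum _ _
      (fun v p : Int => PySem.Set.contains (PySem.Set.ofList nums) (p - v) = true ∧ v ≤ p - v) 0]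
    simp only [zero_add]
    refine congrArg _ (List.map_congr_left (fun v _ => congrArg _ (List.map_congr_left (fun p _ => ?_))))
    simp only [PySem.Set.contains_iff]
  rw [hA, hB]
  have hinner : ∀ v ∈ PySem.Set.ofList nums, (pvPowers.map (fun p =>
        if (p - v) ∈ (PySem.Set.ofList nums : List Int) ∧ v ≤ p - v then (1 : Int) else 0)).sum
      = ((PySem.Set.ofList nums).map (fun y =>
          if v + y ∈ pvPowers ∧ v ≤ y then (1 : Int) else 0)).sum := by
    intro v _
    exact inner_powers_eq (PySem.Set.ofList nums) hnd v
  rw [List.map_congr_left (fun v hv => hinner v hv)]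
  exact double_sum_swap_eq (PySem.Set.ofList nums) hnd _ _
    (fun x hx y hy => pointwise_agree nums x y hx hy)
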